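-- pv_equiv track=rewrite | github.com/credlawn/crm | credlawn/credlawn/doctype/cards/cards.py | increment_code
-- ===== SOURCE A (Python) =====
-- def increment_code(code):
--     if code == "zzzz":
--         return "aaaa"
--
--     code_list = list(code)
--     for i in reversed(range(len(code_list))):
--         if code_list[i] == 'z':
--             code_list[i] = 'a'
--         else:
--             code_list[i] = chr(ord(code_list[i]) + 1)
--             return ''.join(code_list)
--
--     return ''.join(code_list)
-- ===== SOURCE B (Python) =====
-- def increment_code(code):
--     n = len(code)
--     k = n
--     while k > 0 and code[k-1] == 'z':
--         k -= 1
--     if k == 0: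
--         return 'a' * n
--     return code[:k-1] + chr(ord(code[k-1]) + 1) + 'a' * (n - k)
-- ===== Notes on version B (the rewrite author's own statement) =====
-- stated objective: simpler
-- what changed: Replaces the mutate-a-char-list loop with an index-only scan for the rightmost non-carrying position followed by a single slice-and-concatenate expression (A's redundant special case for the all-carry 4-letter string disappears).
import Mathlib
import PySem

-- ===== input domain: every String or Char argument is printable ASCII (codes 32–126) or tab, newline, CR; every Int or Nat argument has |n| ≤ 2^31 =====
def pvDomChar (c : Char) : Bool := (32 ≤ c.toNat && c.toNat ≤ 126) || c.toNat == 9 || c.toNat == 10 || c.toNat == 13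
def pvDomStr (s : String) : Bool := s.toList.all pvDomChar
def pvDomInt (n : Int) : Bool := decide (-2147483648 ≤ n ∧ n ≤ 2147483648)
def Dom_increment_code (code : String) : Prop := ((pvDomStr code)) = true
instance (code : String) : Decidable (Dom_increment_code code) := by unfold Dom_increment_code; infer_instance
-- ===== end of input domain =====

-- B replaces A's mutate-a-char-list right-to-left loop by an index-only scan for the
-- rightmost non-'z' position plus one slice-and-concatenate expression (simpler; same cost).

-- chr(ord(c) + 1), as both Pythons write it
def pyChrSucc (c : Char) : Char := Char.ofNat (c.toNat + 1)

-- ===== PORT A =====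
-- A's for-loop over reversed(range(n)) mutating the list: recursion over the reversed
-- char list; 'z' becomes 'a' and the scan continues, otherwise the char is incremented
-- and the (untouched) remainder is kept — the early return.
def incRevA : List Char → List Char
  | [] => []
  | c :: rest => if c == 'z' then 'a' :: incRevA rest else pyChrSucc c :: rest

def increment_code (code : String) : String :=
  if code == "zzzz" then "aaaa"
  else String.ofList ((incRevA code.toList.reverse).reverse)

-- ===== PORT B =====
-- B's while-loop: step k down from n while code[k-1] == 'z'
def altFind (cs : List Char) : Nat → Nat
  | 0 => 0
  | k + 1 => if cs.getD k ' ' == 'z' then altFind cs k else k + 1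

def altCore (cs : List Char) : List Char :=
  let n := cs.length
  let k := altFind cs n
  if k = 0 then List.replicate n 'a'
  else cs.take (k - 1) ++ pyChrSucc (cs.getD (k - 1) ' ') :: List.replicate (n - k) 'a'

def increment_code_alt (code : String) : String := String.ofList (altCore code.toList)

-- ===== PRECONDITION & SPEC =====
def Spec_increment_code (code : String) (out : String) : Prop := out = increment_code_alt code
instance (code : String) (out : String) : Decidable (Spec_increment_code code out) := by unfold Spec_increment_code; infer_instance

-- ===== CLAIM (what is proved, stated in full; the proofs are below) =====
def Claim_equal_increment_code : Prop := ∀ (code : String), Dom_increment_code code → Spec_increment_code code (increment_code code)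

-- ===== LEMMAS AND PROOFS =====

theorem altFind_le (cs : List Char) (k : Nat) : altFind cs k ≤ k := by
  induction k with
  | zero => simp [altFind]
  | succ k ih => simp only [altFind]; split <;> omega

theorem altFind_append (xs : List Char) (c : Char) (k : Nat) (h : k ≤ xs.length) :
    altFind (xs ++ [c]) k = altFind xs k := by
  induction k with
  | zero => rfl
  | succ k ih =>
    simp only [altFind]
    rw [List.getD_append _ _ _ _ (by omega), ih (by omega)]

theorem getD_last (xs : List Char) (c : Char) : (xs ++ [c]).getD xs.length ' ' = c := by
  simp [List.getD]

theorem altCore_append_z (xs : List Char) :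
    altCore (xs ++ ['z']) = altCore xs ++ ['a'] := by
  have hfind : altFind (xs ++ ['z']) (xs.length + 1) = altFind xs xs.length := by
    simp only [altFind, getD_last]
    rw [if_pos (by decide), altFind_append xs _ _ (le_refl _)]
  have hk := altFind_le xs xs.length
  simp only [altCore, List.length_append, List.length_cons, List.length_nil, Nat.zero_add, hfind]
  by_cases h0 : altFind xs xs.length = 0
  · simp [h0, List.replicate_succ']
  · rw [if_neg h0, if_neg h0]
    have h1 : 1 ≤ altFind xs xs.length := Nat.one_le_iff_ne_zero.mpr h0
    rw [List.take_append_of_le_length (by omega),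
        List.getD_append _ _ _ _ (by omega)]
    have hrep : xs.length + 1 - altFind xs xs.length
        = (xs.length - altFind xs xs.length) + 1 := by omega
    rw [hrep, List.replicate_succ']
    simp

theorem altCore_append_nz (xs : List Char) (c : Char) (hz : c ≠ 'z') :
    altCore (xs ++ [c]) = xs ++ [pyChrSucc c] := by
  have hfind : altFind (xs ++ [c]) (xs.length + 1) = xs.length + 1 := by
    simp only [altFind, getD_last]
    rw [if_neg (by simp [hz])]
  simp only [altCore, List.length_append, List.length_cons, List.length_nil, Nat.zero_add, hfind]
  rw [if_neg (by omega)]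
  simp

theorem incRevA_core (rs : List Char) :
    (incRevA rs).reverse = altCore rs.reverse := by
  induction rs with
  | nil => rfl
  | cons c rest ih =>
    by_cases hz : c = 'z'
    · subst hz
      simp [incRevA, List.reverse_cons, altCore_append_z, ih]
    · simp [incRevA, hz, List.reverse_cons, altCore_append_nz _ _ hz]

theorem increment_code_eq_alt (code : String) :
    increment_code code = increment_code_alt code := by
  unfold increment_code increment_code_alt
  by_cases h : code = "zzzz"
  · subst h; decide
  · rw [if_neg (by simpa using h)]
    have := incRevA_core code.toList.reverse
    rw [this, List.reverse_reverse]

-- ===== VERDICT (by name: the statement is the Claim_ definition above) =====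
theorem increment_code_spec : Claim_equal_increment_code := by
  intro code _
  unfold Spec_increment_code
  exact increment_code_eq_alt code
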